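-- pv_equiv track=rewrite | github.com/MOHAMMAD-KIMIA/Compiler | Compiler 1st phase (Lexical Analysis)/COM.py | dfaPipe
-- ===== SOURCE A (Python) =====
-- def dfaPipe(input_text):
--     state = 'X'
--     pipe_tokens = []
--     pipe_errors = []
--     position = 0
--
--     for ch in input_text:
--         position += 1
--         if ch == '|':
--             pipe_tokens.append("<|>")
--         else:
--             pipe_errors.append(position)
--             break
--
--     return pipe_tokens, pipe_errors
-- ===== SOURCE B (Python) =====
-- def dfaPipe(input_text):
--     count = len(input_text) - len(input_text.lstrip('|'))
--     pipe_tokens = ["<|>"] * count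
--     pipe_errors = [count + 1] if count < len(input_text) else []
--     return pipe_tokens, pipe_errors
-- ===== Notes on version B (the rewrite author's own statement) =====
-- stated objective: simpler
-- what changed: Replaces the explicit scan-and-break loop with a closed form: count the leading pipes via lstrip, build the token list by replication, and compute the single error position arithmetically.
import Mathlib
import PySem

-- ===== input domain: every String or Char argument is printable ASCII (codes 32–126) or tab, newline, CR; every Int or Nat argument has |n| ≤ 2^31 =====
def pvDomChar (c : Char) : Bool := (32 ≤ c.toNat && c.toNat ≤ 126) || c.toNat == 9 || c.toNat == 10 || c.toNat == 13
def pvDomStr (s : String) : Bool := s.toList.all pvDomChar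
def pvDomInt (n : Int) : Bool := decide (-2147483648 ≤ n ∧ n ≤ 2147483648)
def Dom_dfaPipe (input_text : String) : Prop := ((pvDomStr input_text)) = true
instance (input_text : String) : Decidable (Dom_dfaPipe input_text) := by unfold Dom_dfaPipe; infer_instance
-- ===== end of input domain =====

-- B replaces A's scan-and-break loop by a closed form (count the leading pipes via lstrip, replicate, arithmetic error position); objective: simpler.

-- ===== PORT A =====
-- literal port of A's for-loop with break: recursion over the characters carrying position and both accumulators
def dfaPipeLoop : List Char → Int → List String → List Int → List String × List Int
  | [], _, toks, errs => (toks, errs)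
  | c :: rest, position, toks, errs =>
    let position := position + 1
    if c = '|' then dfaPipeLoop rest position (toks ++ ["<|>"]) errs
    else (toks, errs ++ [position])

def dfaPipe (input_text : String) : List String × List Int :=
  dfaPipeLoop input_text.toList 0 [] []

-- ===== PORT B =====
-- lstrip('|') ported by hand as dropWhile (· = '|') (exact: lstrip with an explicit char set strips exactly those leading chars)
def dfaPipe_alt (input_text : String) : List String × List Int :=
  let l := input_text.toList
  let count : Nat := l.length - (l.dropWhile (· = '|')).length
  (List.replicate count "<|>", if count < l.length then [(count : Int) + 1] else [])

-- ===== PRECONDITION & SPEC =====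
def Spec_dfaPipe (input_text : String) (out : List String × List Int) : Prop := out = dfaPipe_alt input_text
instance (input_text : String) (out : List String × List Int) : Decidable (Spec_dfaPipe input_text out) := by unfold Spec_dfaPipe; infer_instance

-- ===== CLAIM (what is proved, stated in full; the proofs are below) =====
def Claim_equal_dfaPipe : Prop := ∀ (input_text : String), Dom_dfaPipe input_text → Spec_dfaPipe input_text (dfaPipe input_text)

-- ===== LEMMAS AND PROOFS =====
lemma dfaPipeLoop_closed (l : List Char) (pos : Int) (toks : List String) (errs : List Int) :
    dfaPipeLoop l pos toks errs =
      (toks ++ List.replicate (l.length - (l.dropWhile (· = '|')).length) "<|>",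
       if l.length - (l.dropWhile (· = '|')).length < l.length then
         errs ++ [pos + (l.length - (l.dropWhile (· = '|')).length : Nat) + 1]
       else errs) := by
  induction l generalizing pos toks errs with
  | nil => simp [dfaPipeLoop]
  | cons c rest ih =>
    by_cases hc : c = '|'
    · have hle : (rest.dropWhile (· = '|')).length ≤ rest.length :=
        List.length_dropWhile_le _ _
      simp only [dfaPipeLoop, hc, List.dropWhile_cons, decide_true, if_true,
        List.length_cons, ih]
      have hcount : rest.length + 1 - (rest.dropWhile (· = '|')).length
          = (rest.length - (rest.dropWhile (· = '|')).length) + 1 := by omega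
      rw [hcount]
      congr 1
      · simp [List.replicate_succ]
      · have hiff : rest.length - (rest.dropWhile (· = '|')).length + 1 < rest.length + 1
            ↔ rest.length - (rest.dropWhile (· = '|')).length < rest.length := by omega
        by_cases h : rest.length - (rest.dropWhile (· = '|')).length < rest.length
        · rw [if_pos h, if_pos (hiff.mpr h)]
          have hcast : ((rest.length - (rest.dropWhile (· = '|')).length + 1 : ℕ) : ℤ)
              = ((rest.length - (rest.dropWhile (· = '|')).length : ℕ) : ℤ) + 1 := by
            push_cast; ring
          rw [hcast]; ring_nf
        · rw [if_neg h, if_neg (fun hh => h (hiff.mp hh))]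
    · simp only [dfaPipeLoop, List.dropWhile_cons, hc, decide_false]
      simp

theorem dfaPipe_spec : Claim_equal_dfaPipe := by
  intro input_text _
  show dfaPipe input_text = dfaPipe_alt input_text
  unfold dfaPipe dfaPipe_alt
  rw [dfaPipeLoop_closed]
  simp
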